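-- pv_equiv track=rewrite | github.com/kos-sandra/learning | acmp/acmp_task_665.py | find_pallindrome
-- ===== SOURCE A (Python) =====
-- def str_n(n):
--     n = str(n)
--     if len(n) == 1:
--         n = '0' + n
--     return n
--
-- def mirror(n):
--     n = str_n(n)
--     res = n[1]+n[0]
--     return res
--
-- def is_pallindrome(h,m):
--     h = str_n(h)
--     if h == m:
--         return True
--     return False
--
-- def find_pallindrome(H,M):
--     for h in range(H, H + 12):
--         h = (24 + h) % 24
--         if M == 59:
--             h = (h + 1) % 24
--         for m in range(M+1, 60):
--             if is_pallindrome(h, mirror(m)):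
--                 res = str_n(h)+':'+str_n(m)
--                 return res
--         M = -1
-- ===== SOURCE B (Python) =====
-- def find_pallindrome(H, M):
--     # For each hour hh = "ab", the unique two-digit minute whose mirror is hh
--     # is m = 10*b + a; so scan the 12 hours once with O(1) arithmetic per hour
--     # instead of testing all 60 minutes against a string mirror.
--     lo = M + 1
--     for k in range(12):
--         h = (H + k) % 24
--         if k == 0 and M == 59:
--             h = (h + 1) % 24
--         m = 10 * (h % 10) + h // 10
--         if lo <= m <= 59:
--             return '%02d:%02d' % (h, m)
--         lo = 0
-- ===== Notes on version B (the rewrite author's own statement) =====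
-- stated objective: alternative
-- what changed: A's nested loops test every remaining minute of every hour by building and string-comparing a mirrored two-digit string; B scans the same 12 hours once and computes each hour's unique mirror minute arithmetically (m = 10*(h%10) + h//10), testing only one candidate per hour.
import Mathlib
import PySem

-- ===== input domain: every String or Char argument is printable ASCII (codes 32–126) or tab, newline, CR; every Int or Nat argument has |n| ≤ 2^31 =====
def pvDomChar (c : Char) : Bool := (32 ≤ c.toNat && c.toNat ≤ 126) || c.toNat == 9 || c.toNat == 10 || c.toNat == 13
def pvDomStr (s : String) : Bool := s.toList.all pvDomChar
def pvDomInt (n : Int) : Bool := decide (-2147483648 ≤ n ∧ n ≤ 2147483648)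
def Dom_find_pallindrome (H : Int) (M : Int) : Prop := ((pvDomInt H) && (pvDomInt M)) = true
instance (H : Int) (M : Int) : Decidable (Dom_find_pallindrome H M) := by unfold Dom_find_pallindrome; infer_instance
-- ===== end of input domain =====

-- B replaces A's nested hour/minute string-mirror scan by a single 12-step scan that computes each
-- hour's unique mirror minute arithmetically (objective: alternative algorithm, fewer candidate tests).

-- ===== PORT A =====
-- str_n(n): pad str(n) to two characters (ports string work on List Char; PySem.Int.toChars = str(n))
def pvStrN (n : Int) : List Char :=
  let s := PySem.Int.toChars n
  if s.length == 1 then '0' :: s else s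

-- mirror(n) = str_n(n)[1] + str_n(n)[0]; both indexes are in range because str_n always has ≥ 2 chars,
-- so the `| _, _ => []` arm (Python's IndexError) is unreachable
def pvMirror (n : Int) : List Char :=
  let s := pvStrN n
  match PySem.List.pyGet? s 1, PySem.List.pyGet? s 0 with
  | some a, some b => [a, b]
  | _, _ => []

def pvIsPallindrome (h : Int) (m : List Char) : Bool :=
  let h' := pvStrN h
  if h' == m then true else false

-- the inner `for m in range(M+1, 60)` loop with its early return
def pvInnerA (h : Int) (ms : List Int) : Option String :=
  match ms with
  | [] => none
  | m :: rest =>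
    if pvIsPallindrome h (pvMirror m) then some (String.ofList (pvStrN h ++ ':' :: pvStrN m))
    else pvInnerA h rest

-- the outer `for h in range(H, H+12)` loop; after the first iteration Python sets M = -1
def pvOuterA (M : Int) (hs : List Int) : Option String :=
  match hs with
  | [] => none
  | h :: rest =>
    let h1 := PySem.Int.mod (24 + h) 24
    let h2 := if M == 59 then PySem.Int.mod (h1 + 1) 24 else h1
    match pvInnerA h2 (PySem.List.pyRange (M + 1) 60 1) with
    | some r => some r
    | none => pvOuterA (-1) rest

-- Python returns None only if no hour matches; 12 consecutive hours always contain a mirrorable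
-- one, so that never happens and the `.getD ""` default is unreachable.
def find_pallindrome (H : Int) (M : Int) : String :=
  (pvOuterA M (PySem.List.pyRange H (H + 12) 1)).getD ""

-- ===== PORT B =====
-- '%02d' % n  (exact for 0 ≤ n < 100, the only values B formats)
def pvPad2 (n : Int) : List Char := PySem.Chars.zfill (PySem.Int.toChars n) 2

-- m = 10 * (h % 10) + h // 10 : the unique minute whose two-digit mirror is the hour h
def pvM0 (h : Int) : Int := 10 * PySem.Int.mod h 10 + PySem.Int.floordiv h 10

-- B's single loop over k in range(12), carrying the lower minute bound lo (M+1, then 0)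
def pvLoopB (H : Int) (M : Int) (lo : Int) (ks : List Int) : Option String :=
  match ks with
  | [] => none
  | k :: rest =>
    let h0 := PySem.Int.mod (H + k) 24
    let h := if k == 0 && M == 59 then PySem.Int.mod (h0 + 1) 24 else h0
    let m := pvM0 h
    if lo ≤ m ∧ m ≤ 59 then some (String.ofList (pvPad2 h ++ ':' :: pvPad2 m))
    else pvLoopB H M 0 rest

-- as in A, the loop always returns before the candidates run out; `.getD ""` is unreachable
def find_pallindrome_alt (H : Int) (M : Int) : String :=
  (pvLoopB H M (M + 1) (PySem.List.pyRange 0 12 1)).getD ""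

-- ===== PRECONDITION & SPEC =====
def Spec_find_pallindrome (H : Int) (M : Int) (out : String) : Prop := out = find_pallindrome_alt H M
instance (H : Int) (M : Int) (out : String) : Decidable (Spec_find_pallindrome H M out) := by unfold Spec_find_pallindrome; infer_instance

-- ===== CLAIM (what is proved, stated in full; the proofs are below) =====
def Claim_equal_find_pallindrome : Prop := ∀ (H : Int) (M : Int), Dom_find_pallindrome H M → Spec_find_pallindrome H M (find_pallindrome H M)

-- ===== LEMMAS AND PROOFS =====

-- the first match of A's inner loop, as a closed test: proof-side helper
def pvResult (h lo : Int) : Option String :=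
  if lo ≤ pvM0 h ∧ pvM0 h ≤ 59 then some (String.ofList (pvPad2 h ++ ':' :: pvPad2 (pvM0 h))) else none

-- pointwise finite facts (kernel evaluation)
set_option maxHeartbeats 1000000 in
theorem pv_key_fin : ∀ (h : Fin 24) (m : Fin 60),
    pvIsPallindrome ((h : Nat) : Int) (pvMirror ((m : Nat) : Int)) = decide (((m : Nat) : Int) = pvM0 ((h : Nat) : Int)) := by decide

theorem pv_strN_pad2_fin : ∀ (n : Fin 60), pvStrN ((n : Nat) : Int) = pvPad2 ((n : Nat) : Int) := by decide

theorem pv_snd_ne_fin : ∀ (h : Fin 24), decide ((pvStrN ((h : Nat) : Int))[1]? = some '-') = false := by decide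

theorem pv_key (h m : Int) (h1 : 0 ≤ h) (h2 : h < 24) (h3 : 0 ≤ m) (h4 : m < 60) :
    pvIsPallindrome h (pvMirror m) = decide (m = pvM0 h) := by
  have := pv_key_fin ⟨h.toNat, by omega⟩ ⟨m.toNat, by omega⟩
  simpa [Int.toNat_of_nonneg h1, Int.toNat_of_nonneg h3] using this

theorem pv_strN_pad2 (n : Int) (h1 : 0 ≤ n) (h2 : n < 60) : pvStrN n = pvPad2 n := by
  have := pv_strN_pad2_fin ⟨n.toNat, by omega⟩
  simpa [Int.toNat_of_nonneg h1] using this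

theorem pv_snd_ne (h : Int) (h1 : 0 ≤ h) (h2 : h < 24) : (pvStrN h)[1]? ≠ some '-' := by
  have := pv_snd_ne_fin ⟨h.toNat, by omega⟩
  simp only [Int.toNat_of_nonneg h1, decide_eq_false_iff_not] at this
  simpa [Int.toNat_of_nonneg h1] using this

-- Nat.toDigits is never empty
theorem pv_toDigits_ne_nil (b n : Nat) : Nat.toDigits b n ≠ [] := by
  simp only [Nat.toDigits, Nat.toDigitsCore]
  split
  · simp
  · intro hc
    have := Nat.toDigitsCore_lens_eq b n (n / b) (Nat.digitChar (n % b)) []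
    rw [hc] at this
    simp at this

-- str(m) for negative m: a '-' followed by at least one digit
theorem pv_toChars_neg (m : Int) (hm : m < 0) :
    PySem.Int.toChars m = '-' :: Nat.toDigits 10 m.natAbs := by
  simp [PySem.Int.toChars]; omega

-- a negative minute candidate never matches an hour 0 ≤ h < 24
theorem pv_noMatchNeg (h m : Int) (h1 : 0 ≤ h) (h2 : h < 24) (hm : m < 0) :
    pvIsPallindrome h (pvMirror m) = false := by
  have hA := pv_toChars_neg m hm
  rcases hds : Nat.toDigits 10 m.natAbs with _ | ⟨d, tl⟩
  · exact absurd hds (pv_toDigits_ne_nil 10 m.natAbs)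
  rw [hds] at hA
  have hs : pvStrN m = '-' :: d :: tl := by
    unfold pvStrN
    rw [hA]
    simp
  have hmir : pvMirror m = [d, '-'] := by
    unfold pvMirror
    rw [hs]
    have hpos : (0 : Int) ≤ (tl.length : Int) + 1 := by positivity
    simp [PySem.List.pyGet?, PySem.List.pyIdx?, hpos]
  rw [hmir]
  unfold pvIsPallindrome
  have hne : (pvStrN h == [d, '-']) = false := by
    rw [beq_eq_false_iff_ne]
    intro he
    apply pv_snd_ne h h1 h2
    rw [he]
    rfl
  simp [hne]

-- A's inner loop over range(lo, 60) equals the closed test pvResult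
theorem pv_inner_char (h : Int) (h1 : 0 ≤ h) (h2 : h < 24) :
    ∀ (n : Nat) (lo : Int), 0 ≤ lo → (60 - lo).toNat = n →
      pvInnerA h (PySem.List.pyRange lo 60 1) = pvResult h lo := by
  intro n
  induction n with
  | zero =>
    intro lo h0 hn
    have h60 : (60 : Int) ≤ lo := by omega
    rw [PySem.List.pyRange_one_eq_nil h60]
    unfold pvInnerA pvResult
    split_ifs with hc
    · exfalso; omega
    · rfl
  | succ n ih =>
    intro lo h0 hn
    have hlt : lo < 60 := by omega
    rw [PySem.List.pyRange_one_cons hlt]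
    simp only [pvInnerA]
    rw [pv_key h lo h1 h2 h0 hlt]
    by_cases he : lo = pvM0 h
    · rw [if_pos (by simp [he])]
      unfold pvResult
      rw [if_pos ⟨by omega, by omega⟩]
      rw [pv_strN_pad2 h h1 (by omega), pv_strN_pad2 lo h0 hlt, he]
    · rw [if_neg (by simp [he])]
      rw [ih (lo + 1) (by omega) (by omega)]
      unfold pvResult
      split_ifs with hc1 hc2 hc2 <;> first | rfl | (exfalso; omega)

-- mod-24 values are hours
theorem pv_mod24 (x : Int) : 0 ≤ PySem.Int.mod x 24 ∧ PySem.Int.mod x 24 < 24 :=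
  ⟨PySem.Int.mod_nonneg (a := x) (b := 24) (by omega), PySem.Int.mod_lt (a := x) (b := 24) (by omega)⟩

theorem pv_m0_nonneg (h : Int) (h1 : 0 ≤ h) : 0 ≤ pvM0 h := by
  have ha := PySem.Int.mod_nonneg (a := h) (b := 10) (by omega)
  have hb : 0 ≤ PySem.Int.floordiv h 10 := by
    rw [PySem.Int.floordiv_eq_ediv_of_pos (a := h) (b := 10) (by omega)]; omega
  unfold pvM0; omega

-- skipping failing candidates in A's inner loop
theorem pv_inner_append (h : Int) (ms1 ms2 : List Int)
    (hfail : ∀ m ∈ ms1, pvIsPallindrome h (pvMirror m) = false) :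
    pvInnerA h (ms1 ++ ms2) = pvInnerA h ms2 := by
  induction ms1 with
  | nil => rfl
  | cons a t ih =>
    simp only [List.cons_append, pvInnerA, hfail a (by simp), Bool.false_eq_true, if_false]
    exact ih (fun m hm => hfail m (by simp [hm]))

-- A ignores how far below -1 the mutated M is
theorem pv_outerA_neg (M : Int) (hM : M ≤ -1) (hs : List Int) :
    pvOuterA M hs = pvOuterA (-1) hs := by
  cases hs with
  | nil => rfl
  | cons h t =>
    have h59 : (M == 59) = false := beq_eq_false_iff_ne.mpr (by omega)
    have h59' : ((-1 : Int) == 59) = false := by decide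
    simp only [pvOuterA, h59, h59', Bool.false_eq_true, if_false]
    have hb := pv_mod24 (24 + h)
    rw [PySem.List.pyRange_one_append (M + 1) 0 60 (by omega) (by omega)]
    rw [pv_inner_append _ _ _ (fun x hx => by
      have := (PySem.List.mem_pyRange_one).1 hx
      exact pv_noMatchNeg _ x hb.1 hb.2 (by omega))]
    rw [show (-1 : Int) + 1 = 0 by ring]

-- A ignores how far above 60 M is
theorem pv_outerA_big (M : Int) (hM : 61 ≤ M) (hs : List Int) :
    pvOuterA M hs = pvOuterA 60 hs := by
  cases hs with
  | nil => rfl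
  | cons h t =>
    have h59 : (M == 59) = false := beq_eq_false_iff_ne.mpr (by omega)
    have h59' : ((60 : Int) == 59) = false := by decide
    simp only [pvOuterA, h59, h59', Bool.false_eq_true, if_false]
    rw [PySem.List.pyRange_one_eq_nil (a := M + 1) (by omega),
        PySem.List.pyRange_one_eq_nil (a := (60 : Int) + 1) (by omega)]

-- B only reads M through the k == 0 test
theorem pv_loopB_M_irrel (ks : List Int) (hks : 0 ∉ ks) (H M M' lo : Int) :
    pvLoopB H M lo ks = pvLoopB H M' lo ks := by
  induction ks generalizing lo with
  | nil => rfl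
  | cons k t ih =>
    have hk : (k == 0) = false := by
      simp only [beq_eq_false_iff_ne]; intro hc; exact hks (by simp [hc])
    simp only [pvLoopB, hk, Bool.false_and, Bool.false_eq_true, if_false]
    split
    · rfl
    · exact ih (fun hc => hks (by simp [hc])) 0

theorem pv_loopB_neg (ks : List Int) (hks : 0 ∉ ks) (H M : Int) (hM : M ≤ -1) :
    pvLoopB H M (M + 1) (0 :: ks) = pvLoopB H (-1) 0 (0 :: ks) := by
  have h59 : (M == 59) = false := beq_eq_false_iff_ne.mpr (by omega)
  have h59' : ((-1 : Int) == 59) = false := by decide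
  simp only [pvLoopB, h59, h59', Bool.and_false, Bool.false_eq_true, if_false]
  have hm0 := pv_m0_nonneg (PySem.Int.mod (H + 0) 24) (pv_mod24 (H + 0)).1
  split_ifs with hc1 hc2 hc2
  · rfl
  · exfalso; omega
  · exfalso; omega
  · exact pv_loopB_M_irrel ks hks H M (-1) 0

theorem pv_loopB_big (ks : List Int) (hks : 0 ∉ ks) (H M : Int) (hM : 61 ≤ M) :
    pvLoopB H M (M + 1) (0 :: ks) = pvLoopB H 60 61 (0 :: ks) := by
  have h59 : (M == 59) = false := beq_eq_false_iff_ne.mpr (by omega)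
  have h59' : ((60 : Int) == 59) = false := by decide
  simp only [pvLoopB, h59, h59', Bool.and_false, Bool.false_eq_true, if_false]
  split_ifs with hc1 hc2 hc2
  · rfl
  · exfalso; omega
  · exfalso; omega
  · exact pv_loopB_M_irrel ks hks H M 60 0

-- the two loops agree after the first hour (A carries M = -1; B carries lo = 0, k ≠ 0)
theorem pv_tail_eq (ks : List Int) (hks : 0 ∉ ks) (H M : Int) :
    pvOuterA (-1) (ks.map (fun k => H + k)) = pvLoopB H M 0 ks := by
  induction ks with
  | nil => rfl
  | cons k t ih =>
    have hk : (k == 0) = false := beq_eq_false_iff_ne.mpr (fun hc => hks (by simp [hc]))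
    have h59 : ((-1 : Int) == 59) = false := by decide
    simp only [List.map_cons, pvOuterA, pvLoopB, hk, h59, Bool.false_and, Bool.false_eq_true, if_false]
    have hmod : PySem.Int.mod (24 + (H + k)) 24 = PySem.Int.mod (H + k) 24 := by
      rw [PySem.Int.mod_eq_emod_of_pos (by omega), PySem.Int.mod_eq_emod_of_pos (by omega)]
      omega
    rw [hmod, show (-1 : Int) + 1 = 0 by ring]
    have hb := pv_mod24 (H + k)
    rw [pv_inner_char (PySem.Int.mod (H + k) 24) hb.1 hb.2 60 0 (by omega) (by decide)]
    unfold pvResult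
    by_cases hc : 0 ≤ pvM0 (PySem.Int.mod (H + k) 24) ∧ pvM0 (PySem.Int.mod (H + k) 24) ≤ 59
    · rw [if_pos hc, if_pos hc]
    · rw [if_neg hc, if_neg hc]
      exact ih (fun hc2 => hks (by simp [hc2]))

-- and on the first hour (k = 0) with -1 ≤ M ≤ 60
theorem pv_head_eq (ks : List Int) (hks : 0 ∉ ks) (H M : Int) (hlo : -1 ≤ M) (hhi : M ≤ 60) :
    pvOuterA M ((0 :: ks).map (fun k => H + k)) = pvLoopB H M (M + 1) (0 :: ks) := by
  simp only [List.map_cons, pvOuterA, pvLoopB, beq_self_eq_true, Bool.true_and]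
  have hmod : PySem.Int.mod (24 + (H + 0)) 24 = PySem.Int.mod (H + 0) 24 := by
    rw [PySem.Int.mod_eq_emod_of_pos (by omega), PySem.Int.mod_eq_emod_of_pos (by omega)]
    omega
  rw [hmod]
  have hb2 : 0 ≤ (if (M == 59 : Bool) then PySem.Int.mod (PySem.Int.mod (H + 0) 24 + 1) 24 else PySem.Int.mod (H + 0) 24) ∧
      (if (M == 59 : Bool) then PySem.Int.mod (PySem.Int.mod (H + 0) 24 + 1) 24 else PySem.Int.mod (H + 0) 24) < 24 := by
    split
    · exact pv_mod24 _
    · exact pv_mod24 _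
  rw [pv_inner_char _ hb2.1 hb2.2 (60 - (M + 1)).toNat (M + 1) (by omega) rfl]
  unfold pvResult
  by_cases hc : M + 1 ≤ pvM0 (if (M == 59 : Bool) then PySem.Int.mod (PySem.Int.mod (H + 0) 24 + 1) 24 else PySem.Int.mod (H + 0) 24) ∧
      pvM0 (if (M == 59 : Bool) then PySem.Int.mod (PySem.Int.mod (H + 0) 24 + 1) 24 else PySem.Int.mod (H + 0) 24) ≤ 59
  · rw [if_pos hc, if_pos hc]
  · rw [if_neg hc, if_neg hc]
    exact pv_tail_eq ks hks H M

theorem pv_range12 (H : Int) : PySem.List.pyRange H (H + 12) 1 = (PySem.List.pyRange 0 12 1).map (fun k => H + k) := by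
  rw [PySem.List.pyRange_one, PySem.List.pyRange_one]
  have h1 : (H + 12 - H) = (12 : Int) := by ring
  rw [h1]
  simp [List.map_map]

theorem pv_range12_cons : PySem.List.pyRange (0 : Int) 12 1 = 0 :: PySem.List.pyRange 1 12 1 :=
  PySem.List.pyRange_one_cons (by omega)

theorem pv_zero_notin : (0 : Int) ∉ PySem.List.pyRange 1 12 1 := by
  intro hc
  have := (PySem.List.mem_pyRange_one).1 hc
  omega

theorem pv_main (H M : Int) (hlo : -1 ≤ M) (hhi : M ≤ 60) :
    find_pallindrome H M = find_pallindrome_alt H M := by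
  unfold find_pallindrome find_pallindrome_alt
  rw [pv_range12, pv_range12_cons, pv_head_eq (PySem.List.pyRange 1 12 1) pv_zero_notin H M hlo hhi]

-- ===== VERDICT (by name: the statement is the Claim_ definition above) =====
theorem find_pallindrome_spec : Claim_equal_find_pallindrome := by
  intro H M _
  unfold Spec_find_pallindrome
  rcases (show M ≤ -1 ∨ -1 < M by omega) with hM | hM
  · rcases (show M = -1 ∨ M < -1 by omega) with rfl | hM'
    · exact pv_main H (-1) (by omega) (by omega)
    · calc find_pallindrome H M
          = (pvOuterA (-1) (PySem.List.pyRange H (H + 12) 1)).getD "" := by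
            unfold find_pallindrome; rw [pv_outerA_neg M (by omega)]
        _ = find_pallindrome H (-1) := rfl
        _ = find_pallindrome_alt H (-1) := pv_main H (-1) (by omega) (by omega)
        _ = find_pallindrome_alt H M := by
            unfold find_pallindrome_alt
            rw [pv_range12_cons, show (-1 : Int) + 1 = 0 by ring,
                ← pv_loopB_neg (PySem.List.pyRange 1 12 1) pv_zero_notin H M (by omega)]
  · rcases (show M ≤ 60 ∨ 60 < M by omega) with hM2 | hM2
    · exact pv_main H M (by omega) hM2
    · calc find_pallindrome H M
          = (pvOuterA 60 (PySem.List.pyRange H (H + 12) 1)).getD "" := by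
            unfold find_pallindrome; rw [pv_outerA_big M (by omega)]
        _ = find_pallindrome H 60 := rfl
        _ = find_pallindrome_alt H 60 := pv_main H 60 (by omega) (by omega)
        _ = find_pallindrome_alt H M := by
            unfold find_pallindrome_alt
            rw [pv_range12_cons, show (60 : Int) + 1 = 61 by ring,
                ← pv_loopB_big (PySem.List.pyRange 1 12 1) pv_zero_notin H M (by omega)]
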